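-- pv_equiv track=rewrite | github.com/jmegner/CheckioPuzzles | bacteria-colonies.py | healthy
-- ===== SOURCE A (Python) =====
-- def healthy(grid):
--     bestRadius = 0
--     bestR = 0
--     bestC = 0
--
--     for r, row in enumerate(grid):
--         for c, elem in enumerate(row):
--             radius = getHealthyRadius(grid, r, c)
--
--             if radius > bestRadius:
--                 bestRadius = radius
--                 bestR = r
--                 bestC = c
--
--     return (bestR, bestC)
--
-- def getHealthyRadius(grid, r, c):
--     if not grid[r][c]:
--         return 0
--
--     radius = 1
--
--     while True:
--         hopefullyFullRing = getRingCells(grid, r, c, radius)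
--         if not all(hopefullyFullRing):
--             break
--
--         radius += 1
--
--     hopefullyEmptyRing = getRingCells(grid, r, c, radius)
--
--     if any(hopefullyEmptyRing):
--         return 0
--
--     return radius
--
-- def getRingCells(grid, r, c, radius):
--     ringCoords = set()
--
--     for delR in range(radius + 1):
--         delC = radius - delR
--
--         ringCoords.add( (r + delR, c + delC) )
--         ringCoords.add( (r + delR, c - delC) )
--         ringCoords.add( (r - delR, c + delC) )
--         ringCoords.add( (r - delR, c - delC) )
--
--     ringCells = [grid[r2][c2] for r2, c2 in ringCoords
--         if inBounds(grid, r2, c2)]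
--
--     return ringCells
--
-- def inBounds(grid, r, c):
--     return r >= 0 and c >= 0 and r < len(grid) and c < len(grid[r])
-- ===== SOURCE B (Python) =====
-- def healthy(grid):
--     # Direct characterization: for a live cell, the break radius of A's ring scan
--     # equals the L1 distance d to the nearest empty cell, and the colony is a
--     # perfect diamond iff no live cell lies at distance exactly d.
--     zeros = [(r, c) for r, row in enumerate(grid) for c, v in enumerate(row) if not v]
--     ones = [(r, c) for r, row in enumerate(grid) for c, v in enumerate(row) if v]
--     bestRadius, bestR, bestC = 0, 0, 0
--     for r, c in ones:
--         d = min(abs(r - zr) + abs(c - zc) for zr, zc in zeros)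
--         if all(abs(r - pr) + abs(c - pc) != d for pr, pc in ones):
--             if d > bestRadius:
--                 bestRadius, bestR, bestC = d, r, c
--     return (bestR, bestC)
-- ===== Notes on version B (the rewrite author's own statement) =====
-- stated objective: alternative
-- what changed: B replaces A's per-cell ring-growing while loop (building coordinate sets ring by ring) with a direct computation: for each live cell the break radius equals the minimum L1 distance d to an empty cell, and the colony is healthy iff no live cell lies at distance exactly d, so B just scans precomputed lists of zero and one coordinates.
import Mathlib
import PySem

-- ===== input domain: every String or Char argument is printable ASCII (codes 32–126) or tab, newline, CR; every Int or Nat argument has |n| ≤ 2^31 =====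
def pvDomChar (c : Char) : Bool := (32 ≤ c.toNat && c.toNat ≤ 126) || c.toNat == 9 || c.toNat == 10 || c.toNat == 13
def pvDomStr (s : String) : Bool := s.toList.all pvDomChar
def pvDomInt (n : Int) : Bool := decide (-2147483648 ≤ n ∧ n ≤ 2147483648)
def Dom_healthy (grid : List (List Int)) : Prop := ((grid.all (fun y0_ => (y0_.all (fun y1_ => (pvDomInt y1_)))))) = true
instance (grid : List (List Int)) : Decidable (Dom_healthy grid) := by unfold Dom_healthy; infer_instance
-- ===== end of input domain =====

-- B computes each cell's colony radius directly (min L1 distance to an empty cell, plus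
-- a distance-ring check over the list of live cells) instead of A's ring-growing while loop.

-- ===== PORT A =====
def getCell (grid : List (List Int)) (r c : Int) : Int :=
  ((PySem.List.pyGet? grid r).bind (fun row => PySem.List.pyGet? row c)).getD 0
  -- grid[r][c]; every call site guarantees the indices are in range, so getD 0 never fires

def inBounds (grid : List (List Int)) (r c : Int) : Bool :=
  decide (0 ≤ r) && decide (0 ≤ c) && decide (r < (grid.length : Int)) &&
    decide (c < ((((PySem.List.pyGet? grid r).getD []).length : Nat) : Int))
  -- short-circuit: grid[r] is only read after 0 <= r < len(grid), where pyGet? is some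

def getRingCells (grid : List (List Int)) (r c radius : Int) : List Int :=
  let ringCoords : PySem.Set (Int × Int) :=
    (PySem.List.pyRange 0 (radius + 1) 1).foldl (fun s delR =>
      let delC := radius - delR
      ((((PySem.Set.add s (r + delR, c + delC)).add (r + delR, c - delC)).add
          (r - delR, c + delC)).add (r - delR, c - delC)))
      PySem.Set.empty
  -- the comprehension iterates the set; its Python order is unspecified and the result is
  -- only consumed by all/any, which are order-independent
  (ringCoords.filter (fun p => inBounds grid p.1 p.2)).map (fun p => getCell grid p.1 p.2)

def ringLoop (grid : List (List Int)) (r c : Int) (radius : Int) : Nat → Int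
  | 0 => radius
  | fuel + 1 =>
    if (getRingCells grid r c radius).all (fun x => decide (x ≠ 0)) then
      ringLoop grid r c (radius + 1) fuel
    else radius
-- fuel bound for A's 'while True': inside Pre_ the loop always breaks at a radius below
-- len(grid) + (max row length) + 2, so this fuel never runs out there

def maxRowLen (grid : List (List Int)) : Nat :=
  (grid.map List.length).foldl max 0

def getHealthyRadius (grid : List (List Int)) (r c : Int) : Int :=
  if getCell grid r c = 0 then 0
  else
    let radius := ringLoop grid r c 1 (grid.length + maxRowLen grid + 2)
    if (getRingCells grid r c radius).any (fun x => decide (x ≠ 0)) then 0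
    else radius

def healthy (grid : List (List Int)) : List Int :=
  let res := (PySem.List.enumerate grid 0).foldl (fun (best : Int × Int × Int) rr =>
    (PySem.List.enumerate rr.2 0).foldl (fun best ce =>
      let radius := getHealthyRadius grid rr.1 ce.1
      if radius > best.1 then (radius, rr.1, ce.1) else best) best) (0, 0, 0)
  [res.2.1, res.2.2]

-- ===== PORT B =====
def cellCoords (grid : List (List Int)) (p : Int → Bool) : List (Int × Int) :=
  (PySem.List.enumerate grid 0).flatMap (fun rr =>
    (PySem.List.enumerate rr.2 0).filterMap (fun ce =>
      if p ce.2 then some (rr.1, ce.1) else none))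

def healthy_alt (grid : List (List Int)) : List Int :=
  let zeros := cellCoords grid (fun v => v == 0)
  let ones := cellCoords grid (fun v => v != 0)
  let res := ones.foldl (fun (best : Int × Int × Int) rc =>
    let d := (PySem.List.min? (zeros.map (fun z => |rc.1 - z.1| + |rc.2 - z.2|)) (fun x => x)).getD 0
    if ones.all (fun q => decide (|rc.1 - q.1| + |rc.2 - q.2| ≠ d)) then
      if d > best.1 then (d, rc.1, rc.2) else best
    else best) (0, 0, 0)
  [res.2.1, res.2.2]

-- ===== PRECONDITION & SPEC =====
-- Pre_ excludes exactly the inputs on which A diverges: grids with at least one nonzero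
-- cell and no zero cell (A's ring check passes vacuously once rings leave the grid).
def Pre_healthy (grid : List (List Int)) : Prop :=
  (0 : Int) ∈ grid.flatMap id ∨ (grid.flatMap id).all (fun x => decide (x = 0)) = true
instance (grid : List (List Int)) : Decidable (Pre_healthy grid) := by
  unfold Pre_healthy; infer_instance

def pvWitness_healthy : List (List Int) := [[1, 1, 1], [1, 1, 1], [1, 1, 0]]

def Spec_healthy (grid : List (List Int)) (out : List Int) : Prop := out = healthy_alt grid
instance (grid : List (List Int)) (out : List Int) : Decidable (Spec_healthy grid out) := by
  unfold Spec_healthy; infer_instance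

-- ===== CLAIM (what is proved, stated in full; the proofs are below) =====
def Claim_equal_healthy : Prop :=
  ∀ (grid : List (List Int)), Dom_healthy grid → Pre_healthy grid → Spec_healthy grid (healthy grid)

-- ===== LEMMAS AND PROOFS =====

-- L1 distance between two coordinate pairs
def pdist (a b : Int × Int) : Int := |a.1 - b.1| + |a.2 - b.2|

theorem mem_enumerate_iff {α : Type} (xs : List α) (s i : Int) (x : α) :
    (i, x) ∈ PySem.List.enumerate xs s ↔
      ∃ k : Nat, i = s + k ∧ xs[k]? = some x := by
  induction xs generalizing s with
  | nil => simp [PySem.List.enumerate_nil]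
  | cons a t ih =>
    rw [PySem.List.enumerate_cons]
    simp only [List.mem_cons, ih, Prod.mk.injEq]
    constructor
    · rintro (⟨hi, hx⟩ | ⟨k, hi, hx⟩)
      · exact ⟨0, by omega, by simpa [hx]⟩
      · exact ⟨k + 1, by push_cast; omega, by simpa using hx⟩
    · rintro ⟨k, hi, hx⟩
      cases k with
      | zero => exact Or.inl ⟨by omega, by simpa using hx.symm⟩
      | succ k => exact Or.inr ⟨k, by push_cast at hi ⊢; omega, by simpa using hx⟩

theorem getCell_eq {grid : List (List Int)} {rn cn : Nat} {row : List Int} {v : Int}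
    (h1 : grid[rn]? = some row) (h2 : row[cn]? = some v) :
    getCell grid (rn : Int) (cn : Int) = v := by
  simp [getCell, PySem.List.pyGet?_natCast, h1, h2]

theorem inBounds_iff (grid : List (List Int)) (r c : Int) :
    inBounds grid r c = true ↔
      ∃ (rn cn : Nat) (row : List Int), r = (rn : Int) ∧ c = (cn : Int) ∧
        grid[rn]? = some row ∧ cn < row.length := by
  unfold inBounds
  constructor
  · intro h
    simp only [Bool.and_eq_true, decide_eq_true_eq] at h
    obtain ⟨⟨⟨hr0, hc0⟩, hrl⟩, hcl⟩ := h
    refine ⟨r.toNat, c.toNat, grid[r.toNat], by omega, by omega, ?_, ?_⟩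
    · simp [List.getElem?_eq_getElem (by omega : r.toNat < grid.length)]
    · rw [show r = ((r.toNat : Nat) : Int) by omega, PySem.List.pyGet?_natCast] at hcl
      rw [List.getElem?_eq_getElem (by omega : r.toNat < grid.length)] at hcl
      simp only [Option.getD_some] at hcl
      omega
  · rintro ⟨rn, cn, row, rfl, rfl, h1, h2⟩
    have hrl : rn < grid.length := by
      by_contra hh
      simp [List.getElem?_eq_none (by omega : grid.length ≤ rn)] at h1
    simp only [Bool.and_eq_true, decide_eq_true_eq]
    refine ⟨⟨⟨by positivity, by positivity⟩, by exact_mod_cast hrl⟩, ?_⟩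
    rw [PySem.List.pyGet?_natCast, h1]
    exact_mod_cast h2

theorem mem_cellCoords (grid : List (List Int)) (p : Int → Bool) (q : Int × Int) :
    q ∈ cellCoords grid p ↔
      ∃ (rn cn : Nat) (row : List Int) (v : Int), grid[rn]? = some row ∧
        row[cn]? = some v ∧ p v = true ∧ q = ((rn : Int), (cn : Int)) := by
  unfold cellCoords
  simp only [List.mem_flatMap, List.mem_filterMap]
  constructor
  · rintro ⟨rr, hrr, ce, hce, hq⟩
    obtain ⟨rr1, rr2⟩ := rr
    obtain ⟨rn, hrn, hrow⟩ := (mem_enumerate_iff grid 0 rr1 rr2).1 hrr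
    obtain ⟨ce1, ce2⟩ := ce
    obtain ⟨cn, hcn, hv⟩ := (mem_enumerate_iff rr2 0 ce1 ce2).1 hce
    split at hq
    · rename_i hp
      refine ⟨rn, cn, rr2, ce2, hrow, hv, hp, ?_⟩
      simp only [Option.some.injEq] at hq
      rw [← hq]
      simp only [Prod.mk.injEq]
      omega
    · simp at hq
  · rintro ⟨rn, cn, row, v, h1, h2, hp, rfl⟩
    refine ⟨((rn : Int), row), ?_, ((cn : Int), v), ?_, by simp [hp]⟩
    · exact (mem_enumerate_iff grid 0 _ _).2 ⟨rn, by omega, h1⟩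
    · exact (mem_enumerate_iff row 0 _ _).2 ⟨cn, by omega, h2⟩

-- cells of cellCoords are in bounds with the stated value property
theorem cellCoords_props {grid : List (List Int)} {p : Int → Bool} {q : Int × Int}
    (h : q ∈ cellCoords grid p) :
    inBounds grid q.1 q.2 = true ∧ p (getCell grid q.1 q.2) = true := by
  obtain ⟨rn, cn, row, v, h1, h2, hp, rfl⟩ := (mem_cellCoords grid p q).1 h
  have hlt : cn < row.length := by
    by_contra hh
    simp [List.getElem?_eq_none (by omega : row.length ≤ cn)] at h2
  exact ⟨(inBounds_iff grid rn cn).2 ⟨rn, cn, row, rfl, rfl, h1, hlt⟩,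
    by rw [getCell_eq h1 h2]; exact hp⟩

-- membership in the fold that builds the ring coordinate set
theorem mem_ringFold (r c radius : Int) (l : List Int) (s : PySem.Set (Int × Int))
    (q : Int × Int) :
    q ∈ l.foldl (fun s delR =>
      let delC := radius - delR
      ((((PySem.Set.add s (r + delR, c + delC)).add (r + delR, c - delC)).add
          (r - delR, c + delC)).add (r - delR, c - delC))) s ↔
      q ∈ s ∨ ∃ delR ∈ l, q = (r + delR, c + (radius - delR)) ∨
        q = (r + delR, c - (radius - delR)) ∨ q = (r - delR, c + (radius - delR)) ∨
        q = (r - delR, c - (radius - delR)) := by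
  induction l generalizing s with
  | nil => simp
  | cons a t ih =>
    simp only [List.foldl_cons, ih, PySem.Set.mem_add, List.mem_cons]
    constructor
    · rintro (h | ⟨d, hd, h4⟩)
      · rcases h with ((((h | h) | h) | h) | h)
        · exact Or.inl h
        all_goals exact Or.inr ⟨a, Or.inl rfl, by tauto⟩
      · exact Or.inr ⟨d, Or.inr hd, h4⟩
    · rintro (h | ⟨d, (rfl | hm), h4⟩)
      · exact Or.inl (by tauto)
      · exact Or.inl (by tauto)
      · exact Or.inr ⟨d, hm, h4⟩

-- membership in the ring coordinate set = L1 distance exactly radius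
theorem mem_ringCoords (r c radius : Int) (hrad : 0 ≤ radius) (q : Int × Int) :
    q ∈ ((PySem.List.pyRange 0 (radius + 1) 1).foldl (fun s delR =>
      let delC := radius - delR
      ((((PySem.Set.add s (r + delR, c + delC)).add (r + delR, c - delC)).add
          (r - delR, c + delC)).add (r - delR, c - delC)))
      PySem.Set.empty) ↔ pdist (r, c) q = radius := by
  rw [mem_ringFold]
  simp only [PySem.Set.empty, List.not_mem_nil, false_or, PySem.List.mem_pyRange_one,
    pdist, Prod.ext_iff, Int.abs_eq_natAbs]
  constructor
  · rintro ⟨delR, ⟨h0, h1⟩, h⟩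
    omega
  · intro h
    exact ⟨((r - q.1).natAbs : Int), by omega, by omega⟩

theorem mem_getRingCells {grid : List (List Int)} {r c radius : Int} (hrad : 0 ≤ radius)
    (x : Int) :
    x ∈ getRingCells grid r c radius ↔
      ∃ q : Int × Int, pdist (r, c) q = radius ∧ inBounds grid q.1 q.2 = true ∧
        getCell grid q.1 q.2 = x := by
  unfold getRingCells
  simp only [List.mem_map, List.mem_filter]
  constructor
  · rintro ⟨q, ⟨hq, hb⟩, rfl⟩
    exact ⟨q, (mem_ringCoords r c radius hrad q).1 hq, hb, rfl⟩
  · rintro ⟨q, hd, hb, rfl⟩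
    exact ⟨q, ⟨(mem_ringCoords r c radius hrad q).2 hd, hb⟩, rfl⟩

-- converse of cellCoords_props
theorem mem_cellCoords_of {grid : List (List Int)} {p : Int → Bool} {r c : Int}
    (hb : inBounds grid r c = true) (hp : p (getCell grid r c) = true) :
    (r, c) ∈ cellCoords grid p := by
  obtain ⟨rn, cn, row, rfl, rfl, h1, h2⟩ := (inBounds_iff grid r c).1 hb
  have hv : row[cn]? = some row[cn] := List.getElem?_eq_getElem h2
  refine (mem_cellCoords grid p _).2 ⟨rn, cn, row, row[cn], h1, hv, ?_, rfl⟩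
  rwa [getCell_eq h1 hv] at hp

theorem all_ring_iff {grid : List (List Int)} {r c radius : Int} (hrad : 0 ≤ radius) :
    (getRingCells grid r c radius).all (fun x => decide (x ≠ 0)) = true ↔
      ∀ q ∈ cellCoords grid (fun v => v == 0), pdist (r, c) q ≠ radius := by
  simp only [List.all_eq_true, decide_eq_true_eq]
  constructor
  · intro h q hq hd
    obtain ⟨hb, hv⟩ := cellCoords_props hq
    have hm : (0 : Int) ∈ getRingCells grid r c radius := by
      refine (mem_getRingCells hrad 0).2 ⟨q, hd, hb, ?_⟩
      simpa using hv
    exact h 0 hm rfl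
  · intro h x hx
    obtain ⟨q, hd, hb, rfl⟩ := (mem_getRingCells hrad x).1 hx
    intro h0
    have hq : (q.1, q.2) ∈ cellCoords grid (fun v => v == 0) :=
      mem_cellCoords_of hb (by simp [h0])
    exact h _ hq hd

theorem any_ring_iff {grid : List (List Int)} {r c radius : Int} (hrad : 0 ≤ radius) :
    (getRingCells grid r c radius).any (fun x => decide (x ≠ 0)) = true ↔
      ∃ q ∈ cellCoords grid (fun v => v != 0), pdist (r, c) q = radius := by
  simp only [List.any_eq_true, decide_eq_true_eq]
  constructor
  · rintro ⟨x, hx, hne⟩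
    obtain ⟨q, hd, hb, rfl⟩ := (mem_getRingCells hrad x).1 hx
    exact ⟨(q.1, q.2), mem_cellCoords_of hb (by simp [hne]), hd⟩
  · rintro ⟨q, hq, hd⟩
    obtain ⟨hb, hv⟩ := cellCoords_props hq
    refine ⟨getCell grid q.1 q.2, (mem_getRingCells hrad _).2 ⟨q, hd, hb, rfl⟩, ?_⟩
    simpa using hv

theorem ringLoop_eq {grid : List (List Int)} {r c d : Int}
    (hmin : ∀ q ∈ cellCoords grid (fun v => v == 0), d ≤ pdist (r, c) q)
    (hwit : ∃ q ∈ cellCoords grid (fun v => v == 0), pdist (r, c) q = d) :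
    ∀ (fuel : Nat) (k : Int), 1 ≤ k → k ≤ d → (d - k).toNat < fuel →
      ringLoop grid r c k fuel = d := by
  intro fuel
  induction fuel with
  | zero => intro k _ _ h3; omega
  | succ fuel ih =>
    intro k h1 h2 h3
    by_cases hk : k = d
    · subst hk
      have hfalse : (getRingCells grid r c k).all (fun x => decide (x ≠ 0)) = false := by
        apply Bool.eq_false_iff.2
        rw [Ne, all_ring_iff (by omega : (0 : Int) ≤ k)]
        push_neg
        obtain ⟨q, hq, hd⟩ := hwit
        exact ⟨q, hq, hd⟩
      rw [ringLoop, hfalse]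
      simp
    · have hlt : k < d := lt_of_le_of_ne h2 hk
      have htrue : (getRingCells grid r c k).all (fun x => decide (x ≠ 0)) = true := by
        rw [all_ring_iff (by omega : (0 : Int) ≤ k)]
        intro q hq hd
        have := hmin q hq
        omega
      rw [ringLoop, htrue]
      simp only [if_true]
      exact ih (k + 1) (by omega) (by omega) (by omega)

theorem inBounds_bounds {grid : List (List Int)} {a b : Int}
    (h : inBounds grid a b = true) :
    0 ≤ a ∧ a < (grid.length : Int) ∧ 0 ≤ b ∧ b < (maxRowLen grid : Int) := by
  obtain ⟨rn, cn, row, rfl, rfl, h1, h2⟩ := (inBounds_iff grid a b).1 h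
  have hrl : rn < grid.length := by
    by_contra hh
    simp [List.getElem?_eq_none (by omega : grid.length ≤ rn)] at h1
  have hrow : row.length ≤ maxRowLen grid := by
    have hmem : row.length ∈ grid.map List.length :=
      List.mem_map_of_mem (List.mem_of_getElem? h1)
    exact (PySem.List.le_foldl_max (grid.map List.length) 0).2 _ hmem
  refine ⟨by positivity, by exact_mod_cast hrl, by positivity, by exact_mod_cast by omega⟩

theorem getHealthyRadius_eq {grid : List (List Int)} {r c : Int}
    (hone : (r, c) ∈ cellCoords grid (fun v => v != 0))
    (hz : cellCoords grid (fun v => v == 0) ≠ []) :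
    getHealthyRadius grid r c =
      (if (cellCoords grid (fun v => v != 0)).all
            (fun q => decide (|r - q.1| + |c - q.2| ≠
              (PySem.List.min? ((cellCoords grid (fun v => v == 0)).map
                (fun z => |r - z.1| + |c - z.2|)) (fun x => x)).getD 0)) then
         (PySem.List.min? ((cellCoords grid (fun v => v == 0)).map
           (fun z => |r - z.1| + |c - z.2|)) (fun x => x)).getD 0
       else 0) := by
  obtain ⟨hb, hv⟩ := cellCoords_props hone
  have hcell : getCell grid r c ≠ 0 := by simpa using hv
  have hmap : (cellCoords grid (fun v => v == 0)).map
      (fun z => |r - z.1| + |c - z.2|) ≠ [] := by simpa using hz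
  obtain ⟨m, hm⟩ : ∃ m, PySem.List.min? ((cellCoords grid (fun v => v == 0)).map
      (fun z => |r - z.1| + |c - z.2|)) (fun x => x) = some m := by
    cases hmin : PySem.List.min? ((cellCoords grid (fun v => v == 0)).map
        (fun z => |r - z.1| + |c - z.2|)) (fun x => x) with
    | none => exact absurd ((PySem.List.min?_eq_none_iff _ _).1 hmin) hmap
    | some m => exact ⟨m, rfl⟩
  obtain ⟨z0, hz0, hz0d⟩ := List.mem_map.1 (PySem.List.min?_mem hm)
  have hz0p : pdist (r, c) z0 = m := hz0d
  have hminall : ∀ q ∈ cellCoords grid (fun v => v == 0), m ≤ pdist (r, c) q := by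
    intro q hq
    exact PySem.List.min?_isMin hm _ (List.mem_map_of_mem hq)
  have hpos : 1 ≤ m := by
    rcases lt_or_ge m 1 with hlt | hge
    · exfalso
      have h0 : pdist (r, c) z0 = m := hz0p
      have hz0eq : z0.1 = r ∧ z0.2 = c := by
        simp only [pdist, Int.abs_eq_natAbs] at h0
        omega
      have hzv := (cellCoords_props hz0).2
      rw [hz0eq.1, hz0eq.2] at hzv
      simp at hzv
      exact hcell hzv
    · exact hge
  have hfb := inBounds_bounds hb
  have hfb0 := inBounds_bounds (cellCoords_props hz0).1
  have hfuel : (m - 1).toNat < grid.length + maxRowLen grid + 2 := by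
    have hmev : |r - z0.1| + |c - z0.2| = m := hz0d
    rw [Int.abs_eq_natAbs, Int.abs_eq_natAbs] at hmev
    omega
  have hloop : ringLoop grid r c 1 (grid.length + maxRowLen grid + 2) = m :=
    ringLoop_eq hminall ⟨z0, hz0, hz0p⟩ _ 1 le_rfl hpos hfuel
  unfold getHealthyRadius
  rw [if_neg hcell]
  simp only [hloop, hm, Option.getD_some]
  by_cases hall : ∀ q ∈ cellCoords grid (fun v => v != 0), pdist (r, c) q ≠ m
  · have hanyf : (getRingCells grid r c m).any (fun x => decide (x ≠ 0)) = false := by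
      apply Bool.eq_false_iff.2
      rw [Ne, any_ring_iff (by omega : (0 : Int) ≤ m)]
      rintro ⟨q, hq, hd⟩
      exact hall q hq hd
    have hallt : (cellCoords grid (fun v => v != 0)).all
        (fun q => decide (|r - q.1| + |c - q.2| ≠ m)) = true := by
      simp only [List.all_eq_true, decide_eq_true_eq]
      intro q hq
      exact hall q hq
    rw [hanyf, hallt]
    simp
  · have hany : (getRingCells grid r c m).any (fun x => decide (x ≠ 0)) = true := by
      rw [any_ring_iff (by omega : (0 : Int) ≤ m)]
      push_neg at hall
      exact hall
    have hallf : (cellCoords grid (fun v => v != 0)).all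
        (fun q => decide (|r - q.1| + |c - q.2| ≠ m)) = false := by
      apply Bool.eq_false_iff.2
      rw [Ne, List.all_eq_true]
      intro hh
      apply hall
      intro q hq
      simpa using hh q hq
    rw [hany, hallf]
    simp



-- proof-side bodies of the two selection folds
def aBody (grid : List (List Int)) (best : Int × Int × Int)
    (t : (Int × Int) × Int) : Int × Int × Int :=
  let radius := getHealthyRadius grid t.1.1 t.1.2
  if radius > best.1 then (radius, t.1.1, t.1.2) else best

def bBody (grid : List (List Int)) (best : Int × Int × Int)
    (rc : Int × Int) : Int × Int × Int :=
  let d := (PySem.List.min? ((cellCoords grid (fun v => v == 0)).map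
      (fun z => |rc.1 - z.1| + |rc.2 - z.2|)) (fun x => x)).getD 0
  if (cellCoords grid (fun v => v != 0)).all
      (fun q => decide (|rc.1 - q.1| + |rc.2 - q.2| ≠ d)) then
    if d > best.1 then (d, rc.1, rc.2) else best
  else best

def cellEntries (grid : List (List Int)) : List ((Int × Int) × Int) :=
  (PySem.List.enumerate grid 0).flatMap (fun rr =>
    (PySem.List.enumerate rr.2 0).map (fun ce => ((rr.1, ce.1), ce.2)))

theorem healthy_eq (grid : List (List Int)) :
    healthy grid = [((cellEntries grid).foldl (aBody grid) (0, 0, 0)).2.1,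
      ((cellEntries grid).foldl (aBody grid) (0, 0, 0)).2.2] := by
  simp only [healthy, cellEntries, List.foldl_flatMap, List.foldl_map]
  rfl

theorem healthy_alt_eq (grid : List (List Int)) :
    healthy_alt grid =
      [((cellCoords grid (fun v => v != 0)).foldl (bBody grid) (0, 0, 0)).2.1,
       ((cellCoords grid (fun v => v != 0)).foldl (bBody grid) (0, 0, 0)).2.2] := rfl

theorem entries_props (grid : List (List Int)) :
    ∀ t ∈ cellEntries grid,
      inBounds grid t.1.1 t.1.2 = true ∧ getCell grid t.1.1 t.1.2 = t.2 := by
  intro t ht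
  simp only [cellEntries, List.mem_flatMap, List.mem_map] at ht
  obtain ⟨rr, hrr, ce, hce, rfl⟩ := ht
  obtain ⟨rr1, rr2⟩ := rr
  obtain ⟨rn, hrn, hrow⟩ := (mem_enumerate_iff grid 0 rr1 rr2).1 hrr
  obtain ⟨ce1, ce2⟩ := ce
  obtain ⟨cn, hcn, hv⟩ := (mem_enumerate_iff rr2 0 ce1 ce2).1 hce
  have hlt : cn < rr2.length := by
    by_contra hh
    simp [List.getElem?_eq_none (by omega : rr2.length ≤ cn)] at hv
  have h1 : rr1 = ((rn : Nat) : Int) := by omega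
  have h2 : ce1 = ((cn : Nat) : Int) := by omega
  subst h1 h2
  exact ⟨(inBounds_iff grid rn cn).2 ⟨rn, cn, rr2, rfl, rfl, hrow, hlt⟩, getCell_eq hrow hv⟩

theorem cellCoords_eq_filterMap (grid : List (List Int)) (p : Int → Bool) :
    cellCoords grid p =
      (cellEntries grid).filterMap (fun t => if p t.2 then some t.1 else none) := by
  simp only [cellCoords, cellEntries, List.filterMap_flatMap, List.filterMap_map]
  rfl

theorem fold_zero_eq (grid : List (List Int)) :
    ∀ l : List ((Int × Int) × Int),
      (∀ t ∈ l, getCell grid t.1.1 t.1.2 = 0) →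
      ∀ best : Int × Int × Int, 0 ≤ best.1 → l.foldl (aBody grid) best = best := by
  intro l
  induction l with
  | nil => intro _ best _; rfl
  | cons t l ih =>
    intro h best hbest
    have hstep : aBody grid best t = best := by
      unfold aBody getHealthyRadius
      rw [if_pos (h t (List.mem_cons_self))]
      rw [if_neg (by omega)]
    rw [List.foldl_cons, hstep]
    exact ih (fun t ht => h t (List.mem_cons_of_mem _ ht)) best hbest

theorem fold_filter_eq {grid : List (List Int)}
    (hz : cellCoords grid (fun v => v == 0) ≠ []) :
    ∀ l : List ((Int × Int) × Int),
      (∀ t ∈ l, inBounds grid t.1.1 t.1.2 = true ∧ getCell grid t.1.1 t.1.2 = t.2) →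
      ∀ best : Int × Int × Int, 0 ≤ best.1 →
      l.foldl (aBody grid) best =
        (l.filterMap (fun t => if t.2 != 0 then some t.1 else none)).foldl
          (bBody grid) best := by
  intro l
  induction l with
  | nil => intro _ best _; rfl
  | cons t l ih =>
    intro h best hbest
    obtain ⟨hb, hv⟩ := h t (List.mem_cons_self)
    have hrest := fun t ht => h t (List.mem_cons_of_mem _ ht)
    by_cases hz0 : t.2 = 0
    · have hr0 : getHealthyRadius grid t.1.1 t.1.2 = 0 := by
        unfold getHealthyRadius
        rw [hv, hz0]
        simp
      have hstep : aBody grid best t = best := by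
        simp only [aBody]
        rw [hr0, if_neg (by omega)]
      rw [List.foldl_cons, hstep, List.filterMap_cons, if_neg (by simp [hz0])]
      exact ih hrest best hbest
    · have hone : (t.1.1, t.1.2) ∈ cellCoords grid (fun v => v != 0) :=
        mem_cellCoords_of hb (by simp [hv, hz0])
      have hr := getHealthyRadius_eq hone hz
      rw [List.filterMap_cons, if_pos (by simp [hz0])]
      by_cases hC : (cellCoords grid (fun v => v != 0)).all
          (fun q => decide (|t.1.1 - q.1| + |t.1.2 - q.2| ≠
            (PySem.List.min? ((cellCoords grid (fun v => v == 0)).map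
              (fun z => |t.1.1 - z.1| + |t.1.2 - z.2|)) (fun x => x)).getD 0)) = true
      · rw [hC] at hr
        simp only [if_true] at hr
        have hstep : aBody grid best t = bBody grid best t.1 := by
          simp only [aBody, bBody]
          rw [hr, hC]
          simp
        rw [List.foldl_cons, List.foldl_cons, hstep]
        by_cases hd : (PySem.List.min? ((cellCoords grid (fun v => v == 0)).map
            (fun z => |t.1.1 - z.1| + |t.1.2 - z.2|)) (fun x => x)).getD 0 > best.1
        · have hb2 : bBody grid best t.1 =
              ((PySem.List.min? ((cellCoords grid (fun v => v == 0)).map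
                (fun z => |t.1.1 - z.1| + |t.1.2 - z.2|)) (fun x => x)).getD 0,
               t.1.1, t.1.2) := by
            simp only [bBody]
            rw [hC, if_pos hd]
            simp
          rw [hb2]
          exact ih hrest _ (by omega)
        · have hb2 : bBody grid best t.1 = best := by
            simp only [bBody]
            rw [hC, if_neg hd]
            simp
          rw [hb2]
          exact ih hrest best hbest
      · have hCf : (cellCoords grid (fun v => v != 0)).all
            (fun q => decide (|t.1.1 - q.1| + |t.1.2 - q.2| ≠
              (PySem.List.min? ((cellCoords grid (fun v => v == 0)).map
                (fun z => |t.1.1 - z.1| + |t.1.2 - z.2|)) (fun x => x)).getD 0)) = false :=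
          Bool.eq_false_iff.2 hC
        rw [hCf] at hr
        simp only [Bool.false_eq_true, if_false] at hr
        have hstep : aBody grid best t = best := by
          simp only [aBody]
          rw [hr, if_neg (by omega)]
        have hb2 : bBody grid best t.1 = best := by
          simp only [bBody]
          rw [hCf]
          simp
        rw [List.foldl_cons, List.foldl_cons, hstep, hb2]
        exact ih hrest best hbest

theorem mem_flatten_iff (grid : List (List Int)) (x : Int) :
    x ∈ grid.flatMap id ↔
      ∃ (rn cn : Nat) (row : List Int), grid[rn]? = some row ∧ row[cn]? = some x := by
  simp only [List.mem_flatMap, id]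
  constructor
  · rintro ⟨row, hrow, hx⟩
    obtain ⟨rn, hrn⟩ := List.mem_iff_getElem?.1 hrow
    obtain ⟨cn, hcn⟩ := List.mem_iff_getElem?.1 hx
    exact ⟨rn, cn, row, hrn, hcn⟩
  · rintro ⟨rn, cn, row, h1, h2⟩
    exact ⟨row, List.mem_of_getElem? h1, List.mem_of_getElem? h2⟩

-- ===== VERDICT (by name: the statement is the Claim_ definition above) =====
theorem healthy_spec : Claim_equal_healthy := by
  intro grid _ hpre
  unfold Spec_healthy
  rw [healthy_eq, healthy_alt_eq]
  by_cases hone : cellCoords grid (fun v => v != 0) = []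
  · have hall0 : ∀ t ∈ cellEntries grid, getCell grid t.1.1 t.1.2 = 0 := by
      intro t ht
      obtain ⟨hb, hv⟩ := entries_props grid t ht
      by_contra hh
      have : (t.1.1, t.1.2) ∈ cellCoords grid (fun v => v != 0) :=
        mem_cellCoords_of hb (by simpa using hh)
      rw [hone] at this
      simp at this
    rw [hone, fold_zero_eq grid (cellEntries grid) hall0 (0, 0, 0) le_rfl]
    rfl
  · have hz : cellCoords grid (fun v => v == 0) ≠ [] := by
      rcases hpre with hmem | hall
      · obtain ⟨rn, cn, row, h1, h2⟩ := (mem_flatten_iff grid 0).1 hmem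
        exact List.ne_nil_of_mem ((mem_cellCoords grid _ _).2
          ⟨rn, cn, row, 0, h1, h2, by simp, rfl⟩)
      · exfalso
        obtain ⟨q, hq⟩ := List.exists_mem_of_ne_nil _ hone
        obtain ⟨rn, cn, row, v, h1, h2, hp, rfl⟩ := (mem_cellCoords grid _ _).1 hq
        have hvmem : v ∈ grid.flatMap id :=
          (mem_flatten_iff grid v).2 ⟨rn, cn, row, h1, h2⟩
        have := (List.all_eq_true.1 hall) v hvmem
        simp at this hp
        exact hp this
    rw [fold_filter_eq hz (cellEntries grid) (entries_props grid) (0, 0, 0) le_rfl,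
      cellCoords_eq_filterMap grid (fun v => v != 0)]
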